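-- pv_equiv track=rewrite | github.com/Jakub-Karczewski/ASD_graphs_and_DP | robot_20\21.py | robot
-- ===== SOURCE A (Python) =====
-- from queue import PriorityQueue
--
-- def robot(L, A, B):
--     n = len(L)
--     m = len(L[0])
--
--     def is_valid(x, y):
--         return 0 <= x < n and 0 <= y < m
--
--     A1 = (A[1], A[0])
--     B1 = (B[1], B[0])
--     a, o = 3, 4
--     dist = [[[[float('inf') for _ in range(o)] for _ in range(a)] for _ in range(m)] for _ in range(n)]
--     vis = [[[[False for _ in range(o)] for _ in range(a)] for _ in range(m)] for _ in range(n)]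
--     delta_o = [[0, 1], [1, 0], [0, -1], [-1, 0]]
--     delta_acc = [60, 40, 30]
--     Q = PriorityQueue()
--     Q.put((0, (A1[0], A1[1], 0, 0)))
--     while (not Q.empty()):
--         val, param = Q.get()
--         x, y, acc, orient = param
--         if(vis[x][y][acc][orient]):
--             continue
--         vis[x][y][acc][orient] = True
--         new_x, new_y = x + delta_o[orient][0], y + delta_o[orient][1]
--
--         if is_valid(new_x, new_y) and L[new_x][new_y] != "X":
--             if acc < 2 and not vis[new_x][new_y][acc + 1][orient]:
--                 if val + delta_acc[acc] < dist[new_x][new_y][acc + 1][orient]: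
--                     dist[new_x][new_y][acc + 1][orient] = val + delta_acc[acc]
--                     Q.put((val + delta_acc[acc], (new_x, new_y, acc + 1, orient)))
--             else:
--                 if val + 30 < dist[new_x][new_y][2][orient] and not vis[new_x][new_y][2][orient]:
--                     dist[new_x][new_y][2][orient] = val + 30
--                     Q.put((val + 30, (new_x, new_y, 2, orient)))
--
--         for i in range(-1, 2, 2):
--             if val + 45 < dist[x][y][0][(orient + i) % 4] and not vis[x][y][0][(orient + i) % 4]:
--                 dist[x][y][0][(orient + i) % 4] = val + 45
--                 Q.put((val + 45, (x, y, 0, (orient + i) % 4)))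
--
--     ans = float('inf')
--     for i in range(a):
--         for j in range(o):
--             ans = min(ans, dist[B1[0]][B1[1]][i][j])
--
--     return ans if ans != float('inf') else None
-- ===== SOURCE B (Python) =====
-- def robot(L, A, B):
--     # One flat slot array of m*12 entries per grid row (slot = y*12 + acc*4 + o)
--     # instead of 4-D nested tables, and a plain list kept sorted by hand-rolled
--     # insertion (pop = head) instead of a binary-heap PriorityQueue.
--     n, m = len(L), len(L[0])
--     INF = float('inf')
--     dist = [[INF] * (m * 12) for _ in range(n)]
--     seen = [[False] * (m * 12) for _ in range(n)]
--
--     queue = [(0, (A[1], A[0], 0, 0))]   # ascending (time, state); head = minimum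
--     while queue:
--         val, (x, y, acc, o) = queue.pop(0)
--         if seen[x][y * 12 + acc * 4 + o]:
--             continue
--         seen[x][y * 12 + acc * 4 + o] = True
--         cand = []
--         dx, dy = ((0, 1), (1, 0), (0, -1), (-1, 0))[o]
--         nx, ny = x + dx, y + dy
--         if 0 <= nx < n and 0 <= ny < m and L[nx][ny] != "X":
--             if acc < 2 and not seen[nx][ny * 12 + (acc + 1) * 4 + o]:
--                 cand.append((val + (60, 40, 30)[acc], (nx, ny, acc + 1, o)))
--             else:
--                 cand.append((val + 30, (nx, ny, 2, o)))
--         cand.append((val + 45, (x, y, 0, (o - 1) % 4)))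
--         cand.append((val + 45, (x, y, 0, (o + 1) % 4)))
--         for nv, t in cand:
--             tx, ty, ta, to = t
--             j = ty * 12 + ta * 4 + to
--             if not seen[tx][j] and nv < dist[tx][j]:
--                 dist[tx][j] = nv
--                 entry = (nv, t)
--                 i = 0
--                 while i < len(queue) and queue[i] < entry:
--                     i += 1
--                 queue.insert(i, entry)
--
--     row = dist[B[1]]
--     best = min(row[B[0] * 12 + t] for t in range(12))
--     return best if best != INF else None
-- ===== Notes on version B (the rewrite author's own statement) =====
-- stated objective: alternative
-- what changed: Replaces the 4-D nested dist/vis tables by one flat slot array of m*12 entries per grid row (slot = y*12 + acc*4 + o), the binary-heap PriorityQueue by a plain list kept sorted by hand-rolled linear insertion (pop = head), and the inline relaxation branches by an explicitly built candidate-edge list filtered by one uniform guard.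
-- outside the precondition, e.g. on robot([['.', 'X'], ['X']], (0, 0), (0, 1)): A returns None, B returns None
import Mathlib
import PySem

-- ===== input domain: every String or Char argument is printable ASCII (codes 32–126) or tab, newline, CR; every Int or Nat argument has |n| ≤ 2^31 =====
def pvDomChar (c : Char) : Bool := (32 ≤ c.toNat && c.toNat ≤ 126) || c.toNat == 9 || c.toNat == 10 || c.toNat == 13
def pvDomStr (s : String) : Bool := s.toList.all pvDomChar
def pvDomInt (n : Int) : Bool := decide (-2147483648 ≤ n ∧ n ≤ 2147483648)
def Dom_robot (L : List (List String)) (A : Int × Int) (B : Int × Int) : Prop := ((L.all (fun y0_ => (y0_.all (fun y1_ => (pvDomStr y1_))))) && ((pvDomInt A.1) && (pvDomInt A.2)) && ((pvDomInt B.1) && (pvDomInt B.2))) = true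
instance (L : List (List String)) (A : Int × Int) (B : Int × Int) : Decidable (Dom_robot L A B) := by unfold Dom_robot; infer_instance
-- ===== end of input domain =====

-- B stores dist/vis as one flat slot array of m*12 entries per grid row (slot index
-- y*12 + acc*4 + o) instead of 4-D nested lists, keeps the queue as a list sorted by
-- hand-rolled insertion (pop = head) instead of a binary-heap PriorityQueue, and relaxes
-- an explicitly built candidate-edge list filtered by one uniform guard.

-- ===== PORT A =====
-- 4D-state (x, y, acceleration, orientation)
abbrev PvSt := Int × Int × Int × Int

-- Python's  l[i] = …  through a chain of list subscripts (negative indices wrap from the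
-- end); an out-of-range write is a no-op here — the Python raises there, outside Pre_robot.
def pvModAt {α : Type} (l : List α) (i : Int) (f : α → α) : List α :=
  match PySem.List.pyIdx? l.length i with
  | some j => l.modify j f
  | none => l

-- vis[x][y][a][o] / dist[x][y][a][o]  (none = IndexError, excluded by Pre_robot)
def pvRd4 {α : Type} (T : List (List (List (List α)))) (s : PvSt) : Option α :=
  (PySem.List.pyGet? T s.1).bind fun r =>
  (PySem.List.pyGet? r s.2.1).bind fun p =>
  (PySem.List.pyGet? p s.2.2.1).bind fun q =>
  PySem.List.pyGet? q s.2.2.2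

def pvWr4 {α : Type} (T : List (List (List (List α)))) (s : PvSt) (v : α) :
    List (List (List (List α))) :=
  pvModAt T s.1 fun r => pvModAt r s.2.1 fun p => pvModAt p s.2.2.1 fun q =>
    pvModAt q s.2.2.2 fun _ => v

-- [[[[v]*4 for _ in range(3)] for _ in range(m)] for _ in range(n)]
def pvMk4 {α : Type} (n m : Int) (v : α) : List (List (List (List α))) :=
  List.replicate n.toNat (List.replicate m.toNat (List.replicate 3 (List.replicate 4 v)))

-- val + w < dist[...]  where a missing entry is float('inf'); a failed read (IndexError in
-- Python, outside Pre_robot) compares as False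
def pvLtD (a : Int) (d : Option (Option Int)) : Bool :=
  match d with
  | some none => true
  | some (some dv) => decide (a < dv)
  | none => false

-- Python tuple comparison on (x, y, acc, orient)
def pvTupLt (s t : PvSt) : Bool :=
  decide (s.1 < t.1) || (decide (s.1 = t.1) &&
    (decide (s.2.1 < t.2.1) || (decide (s.2.1 = t.2.1) &&
      (decide (s.2.2.1 < t.2.2.1) || (decide (s.2.2.1 = t.2.2.1) &&
        decide (s.2.2.2 < t.2.2.2))))))

-- Python tuple comparison on (val, state): both the PriorityQueue of A and the sorted
-- insertion of B order entries this way
def pvEntryLt (p q : Int × PvSt) : Bool :=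
  decide (p.1 < q.1) || (decide (p.1 = q.1) && pvTupLt p.2 q.2)

-- Q.get(): the minimal entry of the queue (entries are compared as Python tuples)
def pvQMin (Q : List (Int × PvSt)) : Option (Int × PvSt) :=
  Q.foldl (fun best p =>
    match best with
    | none => some p
    | some q => if pvEntryLt p q then some p else some q) none

-- delta_o[orient] / delta_acc[acc]; the .getD default is never used by either port's
-- reachable states (orient is always taken mod 4, acc in 0..2)
def pvDeltaO (o : Int) : Int × Int :=
  (PySem.List.pyGet? [((0:Int), (1:Int)), (1, 0), (0, -1), (-1, 0)] o).getD (0, 0)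
def pvDeltaAcc (a : Int) : Int := (PySem.List.pyGet? [(60:Int), 40, 30] a).getD 30

-- L[nx][ny] != "X"  (out-of-range read acts blocked; Python raises there, outside Pre_robot)
def pvCellOk (L : List (List String)) (nx ny : Int) : Bool :=
  decide ((((PySem.List.pyGet? L nx).bind fun r => PySem.List.pyGet? r ny).getD "X") ≠ "X")

-- while not Q.empty(): …  — fuel bounds the iteration count; the callers pass more fuel
-- than the loop can consume, so the fuel-0 branch is never reached.
def robotLoopA (L : List (List String)) (n m : Int) :
    Nat → List (List (List (List (Option Int)))) → List (List (List (List Bool))) →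
    List (Int × PvSt) → List (List (List (List (Option Int))))
  | 0, dist, _, _ => dist
  | fuel + 1, dist, vis, Q =>
    match pvQMin Q with
    | none => dist
    | some (v, s) =>
      let Q1 := Q.erase (v, s)
      match pvRd4 vis s with
      | none => dist        -- vis[x][y][acc][orient] raised IndexError (outside Pre_robot)
      | some true => robotLoopA L n m fuel dist vis Q1
      | some false =>
        let vis1 := pvWr4 vis s true
        let x := s.1
        let y := s.2.1
        let acc := s.2.2.1
        let o := s.2.2.2
        let dxy := pvDeltaO o
        let nx := x + dxy.1
        let ny := y + dxy.2
        let mv :=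
          if decide (0 ≤ nx) && decide (nx < n) && decide (0 ≤ ny) && decide (ny < m)
              && pvCellOk L nx ny then
            if decide (acc < 2) && ((pvRd4 vis1 (nx, ny, acc + 1, o)).getD true == false) then
              if pvLtD (v + pvDeltaAcc acc) (pvRd4 dist (nx, ny, acc + 1, o)) then
                (pvWr4 dist (nx, ny, acc + 1, o) (some (v + pvDeltaAcc acc)),
                 Q1 ++ [(v + pvDeltaAcc acc, (nx, ny, acc + 1, o))])
              else (dist, Q1)
            else
              if pvLtD (v + 30) (pvRd4 dist (nx, ny, 2, o))
                  && ((pvRd4 vis1 (nx, ny, 2, o)).getD true == false) then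
                (pvWr4 dist (nx, ny, 2, o) (some (v + 30)), Q1 ++ [(v + 30, (nx, ny, 2, o))])
              else (dist, Q1)
          else (dist, Q1)
        -- for i in range(-1, 2, 2): the two turns, i = -1 then i = 1
        let no1 := PySem.Int.mod (o + -1) 4
        let t1 :=
          if pvLtD (v + 45) (pvRd4 mv.1 (x, y, 0, no1))
              && ((pvRd4 vis1 (x, y, 0, no1)).getD true == false) then
            (pvWr4 mv.1 (x, y, 0, no1) (some (v + 45)), mv.2 ++ [(v + 45, (x, y, 0, no1))])
          else mv
        let no2 := PySem.Int.mod (o + 1) 4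
        let t2 :=
          if pvLtD (v + 45) (pvRd4 t1.1 (x, y, 0, no2))
              && ((pvRd4 vis1 (x, y, 0, no2)).getD true == false) then
            (pvWr4 t1.1 (x, y, 0, no2) (some (v + 45)), t1.2 ++ [(v + 45, (x, y, 0, no2))])
          else t1
        robotLoopA L n m fuel t2.1 vis1 t2.2

-- min of two dists, none = float('inf')
def pvMinO : Option Int → Option Int → Option Int
  | none, b => b
  | a, none => a
  | some a, some b => some (min a b)

-- ans = min over dist[B1[0]][B1[1]][i][j]; 'ans if ans != inf else None' is the identity
-- in the none-=-inf encoding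
def pvAnsA (dist : List (List (List (List (Option Int))))) (Bp : Int × Int) : Option Int :=
  (PySem.List.pyRange 0 3 1).foldl (fun ans i =>
    (PySem.List.pyRange 0 4 1).foldl (fun ans2 j =>
      pvMinO ans2 ((pvRd4 dist (Bp.2, Bp.1, i, j)).getD none)) ans) none

def robot (L : List (List String)) (A : Int × Int) (B : Int × Int) : Option Int :=
  let n := PySem.List.len L
  let m := PySem.List.len ((PySem.List.pyGet? L 0).getD [])
  let dist0 := pvMk4 n m (none : Option Int)
  let vis0 := pvMk4 n m false
  let distF := robotLoopA L n m (100 * (n.toNat * m.toNat) + 10) dist0 vis0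
    [(0, (A.2, A.1, 0, 0))]
  pvAnsA distF B

-- ===== PORT B =====
-- y * 12 + acc * 4 + o : the slot of a state inside its grid row's flat array
def bJ (y acc o : Int) : Int := y * 12 + acc * 4 + o

-- seen[x][j] / dist[x][j] : Python list indexing wraps a negative index and raises
-- IndexError out of range; the .getD default is never read inside Pre_robot
def bGet2 {α : Type} (l : List (List α)) (x j : Int) (d : α) : α :=
  ((PySem.List.pyGet? l x).bind fun row => PySem.List.pyGet? row j).getD d

-- l[x][j] = v  (wraparound assignment, like A's table writes; out of range is a no-op
-- here — the Python raises there, outside Pre_robot)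
def bSet2 {α : Type} (l : List (List α)) (x j : Int) (v : α) : List (List α) :=
  pvModAt l x fun row => pvModAt row j fun _ => v

-- nv < dist[tx][j]  with none = inf
def bLtI (a : Int) : Option Int → Bool
  | none => true
  | some d => decide (a < d)

-- the linear-scan insertion keeping the queue sorted ascending by Python tuple order
def bIns (e : Int × PvSt) : List (Int × PvSt) → List (Int × PvSt)
  | [] => [e]
  | q :: rest => if pvEntryLt q e then q :: bIns e rest else e :: q :: rest

-- the candidate edges of the popped state: the forward move (with the acc<2 / else
-- branch) followed by the two turns
def bCand (L : List (List String)) (n m : Int) (seen1 : List (List Bool)) (val : Int)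
    (s : PvSt) : List (Int × PvSt) :=
  let dxy := pvDeltaO s.2.2.2
  let nx := s.1 + dxy.1
  let ny := s.2.1 + dxy.2
  let mv : List (Int × PvSt) :=
    if decide (0 ≤ nx) && decide (nx < n) && decide (0 ≤ ny) && decide (ny < m)
        && pvCellOk L nx ny then
      if decide (s.2.2.1 < 2) && !(bGet2 seen1 nx (bJ ny (s.2.2.1 + 1) s.2.2.2) false) then
        [(val + pvDeltaAcc s.2.2.1, (nx, ny, s.2.2.1 + 1, s.2.2.2))]
      else [(val + 30, (nx, ny, 2, s.2.2.2))]
    else []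
  mv ++ [(val + 45, (s.1, s.2.1, 0, PySem.Int.mod (s.2.2.2 - 1) 4)),
         (val + 45, (s.1, s.2.1, 0, PySem.Int.mod (s.2.2.2 + 1) 4))]

-- body of  'for nv, t in cand: …'
def bRelax (seen1 : List (List Bool))
    (p : List (List (Option Int)) × List (Int × PvSt)) (e : Int × PvSt) :
    List (List (Option Int)) × List (Int × PvSt) :=
  let j := bJ e.2.2.1 e.2.2.2.1 e.2.2.2.2
  if !(bGet2 seen1 e.2.1 j false) && bLtI e.1 (bGet2 p.1 e.2.1 j none) then
    (bSet2 p.1 e.2.1 j (some e.1), bIns e p.2)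
  else p

-- while queue: pop the head (the minimum), skip if seen, else mark and relax
def robotLoopB (L : List (List String)) (n m : Int) :
    Nat → List (List (Option Int)) → List (List Bool) → List (Int × PvSt) →
    List (List (Option Int))
  | 0, dist, _, _ => dist
  | _ + 1, dist, _, [] => dist
  | fuel + 1, dist, seen, (val, s) :: rest =>
    let k := bJ s.2.1 s.2.2.1 s.2.2.2
    if bGet2 seen s.1 k false then robotLoopB L n m fuel dist seen rest
    else
      let seen1 := bSet2 seen s.1 k true
      let st := (bCand L n m seen1 val s).foldl (bRelax seen1) (dist, rest)
      robotLoopB L n m fuel st.1 seen1 st.2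

def robot_alt (L : List (List String)) (A : Int × Int) (B : Int × Int) : Option Int :=
  let n := PySem.List.len L
  let m := PySem.List.len ((PySem.List.pyGet? L 0).getD [])
  let dist0 : List (List (Option Int)) :=
    List.replicate n.toNat (List.replicate (m * 12).toNat none)
  let seen0 : List (List Bool) :=
    List.replicate n.toNat (List.replicate (m * 12).toNat false)
  let distF := robotLoopB L n m (100 * (n.toNat * m.toNat) + 10) dist0 seen0
    [(0, (A.2, A.1, 0, 0))]
  let row := (PySem.List.pyGet? distF B.2).getD []
  (PySem.List.pyRange 0 12 1).foldl
    (fun best t => pvMinO best ((PySem.List.pyGet? row (B.1 * 12 + t)).getD none)) none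

-- ===== PRECONDITION & SPEC =====
-- Pre_robot: the grid is nonempty, every row is at least as long as row 0 (the Python
-- only ever indexes columns < len(L[0]); a SHORTER row can raise IndexError when the
-- search reaches its missing cells — whether it does depends on reachability, which no
-- closed form captures, so such grids are excluded even when the short cells are never
-- reached), and both coordinate pairs are in Python's wraparound indexing range (outside
-- it the initial vis[A[1]][A[0]] or the final dist[B[1]][B[0]] lookup raises IndexError).
def Pre_robot (L : List (List String)) (A : Int × Int) (B : Int × Int) : Prop :=
  0 < L.length ∧
  (∀ r ∈ L, (L.headD []).length ≤ r.length) ∧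
  (-(L.length : Int) ≤ A.2 ∧ A.2 < (L.length : Int)) ∧
  (-(((L.headD []).length : Int)) ≤ A.1 ∧ A.1 < (((L.headD []).length : Int))) ∧
  (-(L.length : Int) ≤ B.2 ∧ B.2 < (L.length : Int)) ∧
  (-(((L.headD []).length : Int)) ≤ B.1 ∧ B.1 < (((L.headD []).length : Int)))
instance (L : List (List String)) (A : Int × Int) (B : Int × Int) :
    Decidable (Pre_robot L A B) := by unfold Pre_robot; infer_instance

def pvWitness_robot : List (List String) × (Int × Int) × (Int × Int) :=
  ([[".", "."]], (0, 0), (1, 0))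

def Spec_robot (L : List (List String)) (A : Int × Int) (B : Int × Int) (out : Option Int) :
    Prop := out = robot_alt L A B
instance (L : List (List String)) (A : Int × Int) (B : Int × Int) (out : Option Int) :
    Decidable (Spec_robot L A B out) := by unfold Spec_robot; infer_instance

-- ===== CLAIM =====
def Claim_equal_robot : Prop := ∀ (L : List (List String)) (A : Int × Int) (B : Int × Int), Dom_robot L A B → Pre_robot L A B → Spec_robot L A B (robot L A B)

-- ===== LEMMAS AND PROOFS =====

-- ---------- table theory: resolved indices of A's 4D nested-list tables ----------

def pvRes (N M : Nat) (s : PvSt) : Option (Nat × Nat × Nat × Nat) :=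
  (PySem.List.pyIdx? N s.1).bind fun j =>
  (PySem.List.pyIdx? M s.2.1).bind fun k =>
  (PySem.List.pyIdx? 3 s.2.2.1).bind fun b =>
  (PySem.List.pyIdx? 4 s.2.2.2).map fun c => (j, k, b, c)

def pvRect {α : Type} (T : List (List (List (List α)))) (N M : Nat) : Prop :=
  T.length = N ∧ ∀ r ∈ T, r.length = M ∧ ∀ p ∈ r, p.length = 3 ∧ ∀ q ∈ p, q.length = 4

def pvGet4 {α : Type} (T : List (List (List (List α)))) (r : Nat × Nat × Nat × Nat) :
    Option α :=
  T[r.1]?.bind fun a => a[r.2.1]?.bind fun b => b[r.2.2.1]?.bind fun z => z[r.2.2.2]?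

theorem pv_pyGet?_eq {α : Type} (xs : List α) (i : Int) :
    PySem.List.pyGet? xs i = (PySem.List.pyIdx? xs.length i).bind (fun j => xs[j]?) := by
  simp [PySem.List.pyGet?, PySem.List.pyIdx?]

theorem pv_pyIdx?_lt {n : Nat} {i : Int} {j : Nat}
    (h : PySem.List.pyIdx? n i = some j) : j < n := by
  simp only [PySem.List.pyIdx?] at h
  split at h <;> split at h <;> simp_all <;> omega

theorem pv_rect_mk4 {α : Type} (n m : Int) (v : α) :
    pvRect (pvMk4 n m v) n.toNat m.toNat := by
  refine ⟨by simp [pvMk4], ?_⟩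
  intro r hr
  simp only [pvMk4] at hr
  rw [List.eq_of_mem_replicate hr]
  refine ⟨by simp, ?_⟩
  intro p hp
  rw [List.eq_of_mem_replicate hp]
  refine ⟨by simp, ?_⟩
  intro q hq
  rw [List.eq_of_mem_replicate hq]
  simp

theorem pv_rd4_eq {α : Type} {T : List (List (List (List α)))} {N M : Nat}
    (hT : pvRect T N M) (s : PvSt) :
    pvRd4 T s = (pvRes N M s).bind (fun r => pvGet4 T r) := by
  obtain ⟨hlen, hrows⟩ := hT
  simp only [pvRd4, pvRes, pv_pyGet?_eq, hlen]
  cases h1 : PySem.List.pyIdx? N s.1 with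
  | none => simp
  | some j =>
    simp only [Option.bind_some]
    cases h2 : T[j]? with
    | none =>
      exfalso; have := pv_pyIdx?_lt h1; rw [← hlen] at this
      exact absurd h2 (by simp [List.getElem?_eq_getElem this])
    | some row =>
      have hrow := hrows row (List.mem_of_getElem? h2)
      simp only [h2, Option.bind_some, hrow.1]
      cases h3 : PySem.List.pyIdx? M s.2.1 with
      | none => simp [pvGet4, h2]
      | some k =>
        simp only [Option.bind_some]
        cases h4 : row[k]? with
        | none =>
          exfalso; have := pv_pyIdx?_lt h3; rw [← hrow.1] at this
          exact absurd h4 (by simp [List.getElem?_eq_getElem this])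
        | some p =>
          have hp := hrow.2 p (List.mem_of_getElem? h4)
          simp only [h4, Option.bind_some, hp.1]
          cases h5 : PySem.List.pyIdx? 3 s.2.2.1 with
          | none => simp [pvGet4, h2, h4]
          | some b =>
            simp only [Option.bind_some]
            cases h6 : p[b]? with
            | none =>
              exfalso; have := pv_pyIdx?_lt h5; rw [← hp.1] at this
              exact absurd h6 (by simp [List.getElem?_eq_getElem this])
            | some q =>
              have hq := hp.2 q (List.mem_of_getElem? h6)
              simp only [h6, Option.bind_some, hq]
              cases h7 : PySem.List.pyIdx? 4 s.2.2.2 with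
              | none => simp [h7, pvGet4, h2, h4, h6]
              | some c => simp [h7, pvGet4, h2, h4, h6]

theorem pv_res_inv {N M : Nat} {s : PvSt} {r : Nat × Nat × Nat × Nat}
    (h : pvRes N M s = some r) :
    PySem.List.pyIdx? N s.1 = some r.1 ∧ PySem.List.pyIdx? M s.2.1 = some r.2.1 ∧
    PySem.List.pyIdx? 3 s.2.2.1 = some r.2.2.1 ∧ PySem.List.pyIdx? 4 s.2.2.2 = some r.2.2.2 := by
  simp only [pvRes] at h
  cases e1 : PySem.List.pyIdx? N s.1 <;> rw [e1] at h <;> simp at h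
  cases e2 : PySem.List.pyIdx? M s.2.1 <;> rw [e2] at h <;> simp at h
  cases e3 : PySem.List.pyIdx? 3 s.2.2.1 <;> rw [e3] at h <;> simp at h
  cases e4 : PySem.List.pyIdx? 4 s.2.2.2 <;> rw [e4] at h <;> simp at h
  simp [← h]

theorem pv_modAt_length {α : Type} (l : List α) (i : Int) (f : α → α) :
    (pvModAt l i f).length = l.length := by
  unfold pvModAt; split <;> simp

theorem pv_modAt_getElem?_of_some {α : Type} {l : List α} {i : Int} {j : Nat} (f : α → α)
    (h : PySem.List.pyIdx? l.length i = some j) (k : Nat) :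
    (pvModAt l i f)[k]? = if j = k then l[k]?.map f else l[k]? := by
  simp only [pvModAt, h, List.getElem?_modify]
  cases l[k]? <;> split <;> simp_all

theorem pv_mem_modify {α : Type} {l : List α} {j : Nat} {f : α → α} {a : α}
    (h : a ∈ l.modify j f) : a ∈ l ∨ ∃ x ∈ l, a = f x := by
  obtain ⟨k, hk, he⟩ := List.getElem_of_mem h
  rw [List.length_modify] at hk
  have h2 := List.getElem?_modify f j l k
  rw [List.getElem?_eq_getElem (by rw [List.length_modify]; exact hk), he,
    List.getElem?_eq_getElem hk] at h2
  by_cases hjk : j = k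
  · right
    refine ⟨l[k], List.getElem_mem hk, ?_⟩
    simp [hjk] at h2
    exact h2
  · left
    simp [hjk] at h2
    rw [h2]; exact List.getElem_mem hk

theorem pv_mem_modAt {α : Type} {l : List α} {i : Int} {f : α → α} {a : α}
    (h : a ∈ pvModAt l i f) : a ∈ l ∨ ∃ x ∈ l, a = f x := by
  unfold pvModAt at h
  split at h
  · exact pv_mem_modify h
  · exact Or.inl h

theorem pv_get4_wr4 {α : Type} {T : List (List (List (List α)))} {N M : Nat}
    (hT : pvRect T N M) {s : PvSt} {r : Nat × Nat × Nat × Nat}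
    (hres : pvRes N M s = some r) (v : α) (r' : Nat × Nat × Nat × Nat) :
    pvGet4 (pvWr4 T s v) r' = if r' = r then some v else pvGet4 T r' := by
  obtain ⟨hj, hk, hb, hc⟩ := pv_res_inv hres
  obtain ⟨hlen, hrows⟩ := hT
  obtain ⟨j, k, b, c⟩ := r
  obtain ⟨j', k', b', c'⟩ := r'
  simp only at hj hk hb hc
  simp only [pvGet4, pvWr4, Prod.mk.injEq]
  rw [pv_modAt_getElem?_of_some _ (by rw [hlen]; exact hj)]
  by_cases e1 : j = j'
  · subst e1
    have hjN : j < T.length := by rw [hlen]; exact pv_pyIdx?_lt hj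
    rw [if_pos rfl, List.getElem?_eq_getElem hjN]
    have hrow := hrows _ (List.getElem_mem hjN)
    simp only [Option.map_some, Option.bind_some]
    rw [pv_modAt_getElem?_of_some _ (by rw [hrow.1]; exact hk)]
    by_cases e2 : k = k'
    · subst e2
      have hkM : k < T[j].length := by rw [hrow.1]; exact pv_pyIdx?_lt hk
      rw [if_pos rfl, List.getElem?_eq_getElem hkM]
      have hp := hrow.2 _ (List.getElem_mem hkM)
      simp only [Option.map_some, Option.bind_some]
      rw [pv_modAt_getElem?_of_some _ (by rw [hp.1]; exact hb)]
      by_cases e3 : b = b'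
      · subst e3
        have hb3 : b < T[j][k].length := by rw [hp.1]; exact pv_pyIdx?_lt hb
        rw [if_pos rfl, List.getElem?_eq_getElem hb3]
        have hq := hp.2 _ (List.getElem_mem hb3)
        simp only [Option.map_some, Option.bind_some]
        rw [pv_modAt_getElem?_of_some _ (by rw [hq]; exact hc)]
        by_cases e4 : c = c'
        · subst e4
          have hc4 : c < T[j][k][b].length := by rw [hq]; exact pv_pyIdx?_lt hc
          rw [if_pos rfl, List.getElem?_eq_getElem hc4]
          simp
        · simp [e4, Ne.symm e4, List.getElem?_eq_getElem hjN,
            List.getElem?_eq_getElem (show k < T[j].length by rw [hrow.1]; exact pv_pyIdx?_lt hk),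
            List.getElem?_eq_getElem hb3]
      · simp [e3, Ne.symm e3, List.getElem?_eq_getElem hjN,
          List.getElem?_eq_getElem (show k < T[j].length by rw [hrow.1]; exact pv_pyIdx?_lt hk)]
    · simp [e2, Ne.symm e2, List.getElem?_eq_getElem hjN]
  · simp [e1, Ne.symm e1]

theorem pv_rect_wr4 {α : Type} {T : List (List (List (List α)))} {N M : Nat}
    (hT : pvRect T N M) (s : PvSt) (v : α) : pvRect (pvWr4 T s v) N M := by
  obtain ⟨hlen, hrows⟩ := hT
  refine ⟨by simp [pvWr4, pv_modAt_length, hlen], ?_⟩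
  intro r hr
  have hr' := pv_mem_modAt hr
  rcases hr' with hr' | ⟨x, hx, rfl⟩
  · exact hrows r hr'
  · have hx' := hrows x hx
    refine ⟨by simp [pv_modAt_length, hx'.1], ?_⟩
    intro p hp
    rcases pv_mem_modAt hp with hp' | ⟨x2, hx2, rfl⟩
    · exact hx'.2 p hp'
    · have hx2' := hx'.2 x2 hx2
      refine ⟨by simp [pv_modAt_length, hx2'.1], ?_⟩
      intro q hq
      rcases pv_mem_modAt hq with hq' | ⟨x3, hx3, rfl⟩
      · exact hx2'.2 q hq'
      · simp [pv_modAt_length, hx2'.2 x3 hx3]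

theorem pv_pyIdx?_of_nonneg {n : Nat} {i : Int} (h0 : 0 ≤ i) (h1 : i < (n : Int)) :
    PySem.List.pyIdx? n i = some i.toNat := by
  simp only [PySem.List.pyIdx?]
  rw [if_pos h0, if_pos h1]

-- ---------- the strict total order on queue entries ----------

theorem pv_tupLt_iff (s t : PvSt) : pvTupLt s t = true ↔
    (s.1 < t.1 ∨ (s.1 = t.1 ∧ (s.2.1 < t.2.1 ∨ (s.2.1 = t.2.1 ∧
      (s.2.2.1 < t.2.2.1 ∨ (s.2.2.1 = t.2.2.1 ∧ s.2.2.2 < t.2.2.2)))))) := by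
  simp [pvTupLt]

theorem pv_entryLt_iff (p q : Int × PvSt) : pvEntryLt p q = true ↔
    (p.1 < q.1 ∨ (p.1 = q.1 ∧ pvTupLt p.2 q.2 = true)) := by
  simp [pvEntryLt]

theorem pv_tupLt_irrefl (a : PvSt) : pvTupLt a a = false := by
  rw [← Bool.not_eq_true, pv_tupLt_iff]; omega

theorem pv_tupLt_asymm {a b : PvSt} (h : pvTupLt a b = true) : pvTupLt b a = false := by
  rw [← Bool.not_eq_true, pv_tupLt_iff]; rw [pv_tupLt_iff] at h; omega

theorem pv_tupLt_total {a b : PvSt} (h1 : pvTupLt a b = false) (h2 : pvTupLt b a = false) :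
    a = b := by
  rw [← Bool.not_eq_true, pv_tupLt_iff] at h1 h2
  obtain ⟨a1, a2, a3, a4⟩ := a
  obtain ⟨b1, b2, b3, b4⟩ := b
  simp only at h1 h2
  have : a1 = b1 ∧ a2 = b2 ∧ a3 = b3 ∧ a4 = b4 := by omega
  simp [this.1, this.2.1, this.2.2.1, this.2.2.2]

theorem pv_entryLt_irrefl (a : Int × PvSt) : pvEntryLt a a = false := by
  rw [← Bool.not_eq_true, pv_entryLt_iff]
  simp [pv_tupLt_irrefl]

theorem pv_entryLt_asymm {a b : Int × PvSt} (h : pvEntryLt a b = true) :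
    pvEntryLt b a = false := by
  rw [← Bool.not_eq_true, pv_entryLt_iff]
  rw [pv_entryLt_iff] at h
  rcases h with h | ⟨e, t⟩
  · omega
  · intro h2
    rcases h2 with h2 | ⟨e2, t2⟩
    · omega
    · rw [pv_tupLt_asymm t] at t2; exact absurd t2 (by simp)

theorem pv_entryLt_total {a b : Int × PvSt} (h1 : pvEntryLt a b = false)
    (h2 : pvEntryLt b a = false) : a = b := by
  rw [← Bool.not_eq_true, pv_entryLt_iff] at h1 h2
  have e : a.1 = b.1 := by omega
  have t1 : pvTupLt a.2 b.2 = false := by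
    rw [← Bool.not_eq_true]; intro h; exact h1 (Or.inr ⟨e, h⟩)
  have t2 : pvTupLt b.2 a.2 = false := by
    rw [← Bool.not_eq_true]; intro h; exact h2 (Or.inr ⟨e.symm, h⟩)
  exact Prod.ext e (pv_tupLt_total t1 t2)

-- ---------- pvQMin picks the unique minimum ----------

theorem pv_qmin_eq_aux (z : Int × PvSt) :
    ∀ (l : List (Int × PvSt)) (a : Int × PvSt),
      (z ∈ l ∨ a = z) → (∀ w ∈ l, w = z ∨ pvEntryLt z w = true) →
      (a = z ∨ pvEntryLt z a = true) →
      (l.foldl (fun best p =>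
        match best with
        | none => some p
        | some q => if pvEntryLt p q then some p else some q) (some a)) = some z := by
  intro l
  induction l with
  | nil =>
    intro a hin _ _
    rcases hin with h | rfl
    · exact absurd h (by simp)
    · rfl
  | cons x l ih =>
    intro a hin hminl hacc
    simp only [List.foldl_cons]
    have hx := hminl x List.mem_cons_self
    by_cases hxa : pvEntryLt x a = true
    · rw [if_pos hxa]
      apply ih
      · rcases hx with hxz | hzx
        · exact Or.inr hxz
        · rcases hacc with haz | hza
          · rw [haz, pv_entryLt_asymm hzx] at hxa; exact absurd hxa (by simp)
          · rcases hin with hin | haz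
            · rcases List.mem_cons.mp hin with hzx2 | hm
              · exact Or.inr hzx2.symm
              · exact Or.inl hm
            · rw [haz, pv_entryLt_irrefl] at hza; exact absurd hza (by simp)
      · intro w hw; exact hminl w (List.mem_cons_of_mem _ hw)
      · exact hx
    · rw [if_neg hxa]
      apply ih
      · rcases hin with hin | haz
        · rcases List.mem_cons.mp hin with hzx | hm
          · rcases hacc with haz | hza
            · exact Or.inr haz
            · exact absurd (by rw [← hzx]; exact hza) hxa
          · exact Or.inl hm
        · exact Or.inr haz
      · intro w hw; exact hminl w (List.mem_cons_of_mem _ hw)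
      · exact hacc

theorem pv_qmin_eq {Q : List (Int × PvSt)} {z : Int × PvSt} (hz : z ∈ Q)
    (hmin : ∀ w ∈ Q, w = z ∨ pvEntryLt z w = true) : pvQMin Q = some z := by
  cases Q with
  | nil => exact absurd hz (by simp)
  | cons x l =>
    unfold pvQMin
    simp only [List.foldl_cons]
    apply pv_qmin_eq_aux z l x
    · rcases List.mem_cons.mp hz with rfl | hm
      · exact Or.inr rfl
      · exact Or.inl hm
    · intro w hw; exact hmin w (List.mem_cons_of_mem _ hw)
    · exact hmin x List.mem_cons_self

theorem pv_qmin_nil_of_perm {Q : List (Int × PvSt)} (h : Q.Perm []) : pvQMin Q = none := by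
  rw [List.Perm.eq_nil h]; rfl

-- the head of a sorted list is the minimum of any permutation of it
theorem pv_qmin_head {Q rest : List (Int × PvSt)} {e : Int × PvSt}
    (perm : Q.Perm (e :: rest))
    (sorted : (e :: rest).Pairwise (fun a b => pvEntryLt b a = false)) :
    pvQMin Q = some e := by
  apply pv_qmin_eq (perm.mem_iff.mpr List.mem_cons_self)
  intro w hw
  rcases List.mem_cons.mp (perm.mem_iff.mp hw) with rfl | hm
  · exact Or.inl rfl
  · have hle := (List.pairwise_cons.mp sorted).1 w hm
    by_cases hlt : pvEntryLt e w = true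
    · exact Or.inr hlt
    · exact Or.inl (pv_entryLt_total hle (by simpa using hlt))

-- ---------- wrap-range states and B's per-row slot index ----------

def pvIFl (r : Nat × Nat × Nat × Nat) : Nat := r.2.1 * 12 + r.2.2.1 * 4 + r.2.2.2

def pvValidR (N M : Nat) (r : Nat × Nat × Nat × Nat) : Prop :=
  r.1 < N ∧ r.2.1 < M ∧ r.2.2.1 < 3 ∧ r.2.2.2 < 4

def pvWrapSt (N M : Nat) (t : PvSt) : Prop :=
  -(N : Int) ≤ t.1 ∧ t.1 < (N : Int) ∧ -(M : Int) ≤ t.2.1 ∧ t.2.1 < (M : Int) ∧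
  0 ≤ t.2.2.1 ∧ t.2.2.1 < 3 ∧ 0 ≤ t.2.2.2 ∧ t.2.2.2 < 4

theorem pv_pyIdx?_wrap {N : Nat} {i : Int} (h1 : -(N : Int) ≤ i) (h2 : i < (N : Int)) :
    PySem.List.pyIdx? N i = some (PySem.Int.mod i (N : Int)).toNat := by
  have hN : (0 : Int) < (N : Int) := by omega
  rw [PySem.Int.mod_eq_emod_of_pos hN]
  simp only [PySem.List.pyIdx?]
  split
  · next h0 =>
    rw [Int.emod_eq_of_lt h0 h2]
  · next h0 =>
    have e : i % (N : Int) = i + N := by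
      conv_lhs => rw [show i = (i + N) + (N : Int) * (-1) by ring]
      rw [Int.add_mul_emod_self_left, Int.emod_eq_of_lt (by omega) (by omega)]
    rw [e]
    simp only [Option.some_inj]
    omega

-- the characterization of Python's % for a wrap-range numerator
theorem pv_mod_wrap {M : Nat} {y : Int} (h1 : -(M : Int) ≤ y) (h2 : y < (M : Int)) :
    PySem.Int.mod y (M : Int) = if 0 ≤ y then y else y + M := by
  have hM : (0 : Int) < (M : Int) := by omega
  rw [PySem.Int.mod_eq_emod_of_pos hM]
  split
  · next h0 => exact Int.emod_eq_of_lt h0 h2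
  · next h0 =>
    conv_lhs => rw [show y = (y + M) + (M : Int) * (-1) by ring]
    rw [Int.add_mul_emod_self_left, Int.emod_eq_of_lt (by omega) (by omega)]

theorem pv_wrap_res {N M : Nat} {t : PvSt} (h : pvWrapSt N M t) :
    ∃ r, pvRes N M t = some r ∧ pvValidR N M r ∧
      PySem.List.pyIdx? N t.1 = some r.1 ∧
      PySem.List.pyIdx? (M * 12) (bJ t.2.1 t.2.2.1 t.2.2.2) = some (pvIFl r) := by
  obtain ⟨h1, h2, h3, h4, h5, h6, h7, h8⟩ := h
  have hN : (0 : Int) < (N : Int) := by omega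
  have hM : (0 : Int) < (M : Int) := by omega
  have hchar := pv_mod_wrap h3 h4
  have e2 := PySem.Int.mod_nonneg t.2.1 hM
  have e2' := PySem.Int.mod_lt t.2.1 hM
  refine ⟨((PySem.Int.mod t.1 N).toNat, (PySem.Int.mod t.2.1 M).toNat, t.2.2.1.toNat,
    t.2.2.2.toNat), ?_, ?_, ?_, ?_⟩
  · simp only [pvRes, pv_pyIdx?_wrap h1 h2, pv_pyIdx?_wrap h3 h4,
      pv_pyIdx?_of_nonneg h5 (by exact_mod_cast h6),
      pv_pyIdx?_of_nonneg h7 (by exact_mod_cast h8), Option.bind_some, Option.map_some]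
  · have b1 := PySem.Int.mod_lt t.1 hN
    have b2 := PySem.Int.mod_nonneg t.1 hN
    simp only [pvValidR]
    refine ⟨by omega, by omega, by omega, by omega⟩
  · exact pv_pyIdx?_wrap h1 h2
  · have hMn : ((M * 12 : Nat) : Int) = (M : Int) * 12 := by push_cast; ring
    have hj1 : -((M * 12 : Nat) : Int) ≤ bJ t.2.1 t.2.2.1 t.2.2.2 := by
      simp only [bJ, hMn]; omega
    have hj2 : bJ t.2.1 t.2.2.1 t.2.2.2 < ((M * 12 : Nat) : Int) := by
      simp only [bJ, hMn]; omega
    rw [pv_pyIdx?_wrap hj1 hj2]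
    congr 1
    have hchar2 := pv_mod_wrap (M := M * 12) (y := bJ t.2.1 t.2.2.1 t.2.2.2)
      (by simpa using hj1) (by simpa using hj2)
    simp only [bJ] at hchar2 ⊢
    simp only [pvIFl]
    rw [hchar2]
    split
    · next h0 =>
      have hy0 : 0 ≤ t.2.1 := by omega
      rw [hchar, if_pos hy0]
      push_cast
      omega
    · next h0 =>
      have hy0 : ¬ (0 ≤ t.2.1) := by omega
      rw [hchar, if_neg hy0]
      push_cast
      omega

theorem pv_ifl_lt {N M : Nat} {r : Nat × Nat × Nat × Nat} (h : pvValidR N M r) :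
    pvIFl r < M * 12 := by
  obtain ⟨h1, h2, h3, h4⟩ := h
  simp only [pvIFl]
  omega

theorem pv_ifl_inj {N M : Nat} {r r' : Nat × Nat × Nat × Nat}
    (h : pvValidR N M r) (h' : pvValidR N M r') (he1 : r.1 = r'.1)
    (he2 : pvIFl r = pvIFl r') : r = r' := by
  obtain ⟨h1, h2, h3, h4⟩ := h
  obtain ⟨h1', h2', h3', h4'⟩ := h'
  simp only [pvIFl] at he2
  obtain ⟨a1, a2, a3, a4⟩ := r
  obtain ⟨b1, b2, b3, b4⟩ := r'
  simp only at he1 he2 h2 h3 h4 h2' h3' h4'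
  simp only [Prod.mk.injEq]
  omega

theorem pv_tupLt_trans {a b c : PvSt} (h1 : pvTupLt a b = true) (h2 : pvTupLt b c = true) :
    pvTupLt a c = true := by
  rw [pv_tupLt_iff] at *; omega

theorem pv_entryLt_trans {a b c : Int × PvSt} (h1 : pvEntryLt a b = true)
    (h2 : pvEntryLt b c = true) : pvEntryLt a c = true := by
  rw [pv_entryLt_iff] at *
  rcases h1 with h1 | ⟨e1, t1⟩ <;> rcases h2 with h2 | ⟨e2, t2⟩
  · exact Or.inl (by omega)
  · exact Or.inl (by omega)
  · exact Or.inl (by omega)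
  · exact Or.inr ⟨by omega, pv_tupLt_trans t1 t2⟩

-- ---------- B's row-array writes and reads against A's 4D tables ----------

def pvRect2 {α : Type} (l : List (List α)) (N M : Nat) : Prop :=
  l.length = N ∧ ∀ row ∈ l, row.length = M * 12

def pvGet2N {α : Type} (l : List (List α)) (r : Nat × Nat × Nat × Nat) : Option α :=
  l[r.1]?.bind fun row => row[pvIFl r]?

-- a wrap-range state: A's 4D read returns the entry B's row read returns
theorem pv_read_corr {α : Type} {T : List (List (List (List α)))} {N M : Nat}
    {fl : List (List α)} (rect : pvRect T N M) (rect2 : pvRect2 fl N M)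
    (rd : ∀ r, pvValidR N M r → pvGet4 T r = pvGet2N fl r)
    {t : PvSt} (hw : pvWrapSt N M t) (d : α) :
    ∃ (w : α) (r : Nat × Nat × Nat × Nat), pvRes N M t = some r ∧ pvValidR N M r ∧
      pvRd4 T t = some w ∧ bGet2 fl t.1 (bJ t.2.1 t.2.2.1 t.2.2.2) d = w := by
  obtain ⟨r, hres, hval, hx, hj⟩ := pv_wrap_res hw
  have hr1 : r.1 < fl.length := by rw [rect2.1]; exact hval.1
  have hrow := rect2.2 _ (List.getElem_mem hr1)
  have hif : pvIFl r < fl[r.1].length := by rw [hrow]; exact pv_ifl_lt hval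
  refine ⟨fl[r.1][pvIFl r], r, hres, hval, ?_, ?_⟩
  · rw [pv_rd4_eq rect, hres]
    simp only [Option.bind_some]
    rw [rd r hval]
    simp [pvGet2N, List.getElem?_eq_getElem hr1, List.getElem?_eq_getElem hif]
  · simp only [bGet2, pv_pyGet?_eq, rect2.1, hx, Option.bind_some,
      List.getElem?_eq_getElem hr1, hrow, hj, List.getElem?_eq_getElem hif]
    rfl

theorem pv_corr_write {α : Type} {T : List (List (List (List α)))} {N M : Nat}
    {fl : List (List α)} (rect : pvRect T N M) (rect2 : pvRect2 fl N M)
    (rd : ∀ r, pvValidR N M r → pvGet4 T r = pvGet2N fl r)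
    {t : PvSt} {rt : Nat × Nat × Nat × Nat}
    (hres : pvRes N M t = some rt) (hval : pvValidR N M rt)
    (hx : PySem.List.pyIdx? N t.1 = some rt.1)
    (hj : PySem.List.pyIdx? (M * 12) (bJ t.2.1 t.2.2.1 t.2.2.2) = some (pvIFl rt)) (v : α) :
    ∀ r, pvValidR N M r → pvGet4 (pvWr4 T t v) r =
      pvGet2N (bSet2 fl t.1 (bJ t.2.1 t.2.2.1 t.2.2.2) v) r := by
  intro r hr
  have hr1 : rt.1 < fl.length := by rw [rect2.1]; exact hval.1
  rw [pv_get4_wr4 rect hres]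
  simp only [pvGet2N, bSet2]
  rw [pv_modAt_getElem?_of_some _ (by rw [rect2.1]; exact hx)]
  by_cases h1 : rt.1 = r.1
  · rw [if_pos h1, ← h1, List.getElem?_eq_getElem hr1]
    have hrow := rect2.2 _ (List.getElem_mem hr1)
    simp only [Option.map_some, Option.bind_some]
    rw [pv_modAt_getElem?_of_some _ (by rw [hrow]; exact hj)]
    by_cases h2 : pvIFl rt = pvIFl r
    · have hrr : r = rt := pv_ifl_inj hr hval h1.symm h2.symm
      subst hrr
      rw [if_pos rfl, if_pos h2, List.getElem?_eq_getElem (by rw [hrow]; exact pv_ifl_lt hval)]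
      simp
    · have hrr : r ≠ rt := fun he => h2 (by rw [he])
      rw [if_neg hrr, if_neg h2, rd r hr]
      simp [pvGet2N, ← h1, List.getElem?_eq_getElem hr1]
  · have hrr : r ≠ rt := fun he => h1 (by rw [he])
    rw [if_neg hrr, if_neg h1, rd r hr]
    rfl

theorem pv_rect2_set {α : Type} {fl : List (List α)} {N M : Nat} (rect2 : pvRect2 fl N M)
    (x j : Int) (v : α) : pvRect2 (bSet2 fl x j v) N M := by
  refine ⟨by rw [bSet2, pv_modAt_length, rect2.1], ?_⟩
  intro row hrow
  rcases pv_mem_modAt hrow with hm | ⟨row0, hm0, rfl⟩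
  · exact rect2.2 row hm
  · rw [pv_modAt_length]
    exact rect2.2 row0 hm0

-- ---------- the sorted insertion ----------

theorem pv_bIns_perm (e : Int × PvSt) (l : List (Int × PvSt)) : (bIns e l).Perm (e :: l) := by
  induction l with
  | nil => exact List.Perm.refl _
  | cons q rest ih =>
    simp only [bIns]
    split
    · exact (ih.cons q).trans (List.Perm.swap e q rest)
    · exact List.Perm.refl _

theorem pv_bIns_sorted {l : List (Int × PvSt)}
    (h : l.Pairwise (fun a b => pvEntryLt b a = false)) (e : Int × PvSt) :
    (bIns e l).Pairwise (fun a b => pvEntryLt b a = false) := by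
  induction l with
  | nil => simp [bIns]
  | cons q rest ih =>
    rw [List.pairwise_cons] at h
    simp only [bIns]
    split
    · next hlt =>
      rw [List.pairwise_cons]
      refine ⟨?_, ih h.2⟩
      intro b hb
      rcases List.mem_cons.mp ((pv_bIns_perm e rest).mem_iff.mp hb) with rfl | hbr
      · exact pv_entryLt_asymm hlt
      · exact h.1 b hbr
    · next hlt =>
      rw [List.pairwise_cons]
      constructor
      · intro b hb
        rcases List.mem_cons.mp hb with rfl | hbr
        · simpa using hlt
        · have hqb := h.1 b hbr
          by_contra hbe
          rw [Bool.not_eq_false] at hbe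
          by_cases hqb2 : pvEntryLt q b = true
          · exact absurd (pv_entryLt_trans hqb2 hbe) (by simpa using hlt)
          · have : q = b := pv_entryLt_total (by simpa using hqb2) hqb
            subst this
            exact absurd hbe (by simpa using hlt)
      · rw [List.pairwise_cons]
        exact ⟨h.1, h.2⟩

-- ---------- the mid-step relation and one relaxation ----------

structure PvMid (N M : Nat) (dA : List (List (List (List (Option Int)))))
    (Qa : List (Int × PvSt)) (fl : List (List (Option Int)))
    (Qb : List (Int × PvSt)) : Prop where
  rectA : pvRect dA N M
  rect2 : pvRect2 fl N M
  rd : ∀ r, pvValidR N M r → pvGet4 dA r = pvGet2N fl r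
  wrap : ∀ p ∈ Qa, pvWrapSt N M p.2
  perm : Qa.Perm Qb
  sorted : Qb.Pairwise (fun a b => pvEntryLt b a = false)

theorem pv_relax_corr {N M : Nat} {dA : List (List (List (List (Option Int))))}
    {Qa : List (Int × PvSt)} {fl : List (List (Option Int))} {Qb : List (Int × PvSt)}
    (mid : PvMid N M dA Qa fl Qb) {e : Int × PvSt} (hw : pvWrapSt N M e.2) (g : Bool) :
    PvMid N M (if g then pvWr4 dA e.2 (some e.1) else dA) (if g then Qa ++ [e] else Qa)
      (if g then bSet2 fl e.2.1 (bJ e.2.2.1 e.2.2.2.1 e.2.2.2.2) (some e.1) else fl)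
      (if g then bIns e Qb else Qb) := by
  cases g with
  | false => simpa using mid
  | true =>
    simp only [if_true]
    obtain ⟨r, hres, hval, hx, hj⟩ := pv_wrap_res hw
    refine ⟨pv_rect_wr4 mid.rectA _ _, pv_rect2_set mid.rect2 _ _ _, ?_, ?_, ?_, ?_⟩
    · exact pv_corr_write mid.rectA mid.rect2 mid.rd hres hval hx hj _
    · intro p hp
      rcases List.mem_append.mp hp with hp | hp
      · exact mid.wrap p hp
      · rw [List.mem_singleton.mp hp]; exact hw
    · exact ((List.perm_append_singleton e Qa).trans (mid.perm.cons e)).trans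
        (pv_bIns_perm e Qb).symm
    · exact pv_bIns_sorted mid.sorted e

theorem pv_ite_pair {α β : Type} {c : Prop} [Decidable c] (a : α) (b : β) (a' : α) (b' : β) :
    (if c then (a, b) else (a', b')) = (if c then a else a', if c then b else b') := by
  split <;> rfl

-- pvLtD on a present table entry is B's comparison against the row entry
theorem pv_ltD_some (a : Int) (w : Option Int) : pvLtD a (some w) = bLtI a w := by
  cases w <;> rfl

theorem pv_bRelax_eq {seen1 : List (List Bool)}
    {p : List (List (Option Int)) × List (Int × PvSt)} {e : Int × PvSt} {g : Bool}
    (h : (!(bGet2 seen1 e.2.1 (bJ e.2.2.1 e.2.2.2.1 e.2.2.2.2) false) &&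
      bLtI e.1 (bGet2 p.1 e.2.1 (bJ e.2.2.1 e.2.2.2.1 e.2.2.2.2) none)) = g) :
    bRelax seen1 p e =
      if g then (bSet2 p.1 e.2.1 (bJ e.2.2.1 e.2.2.2.1 e.2.2.2.2) (some e.1), bIns e p.2)
      else p := by
  subst h; rfl

-- ---------- one fresh step of each loop, named ----------

-- the body of A's loop after popping (v, s) unvisited: vis1 is the updated visited
-- table, Q1 the queue after the erase
def pvStepA (L : List (List String)) (n m : Int)
    (dist : List (List (List (List (Option Int))))) (vis1 : List (List (List (List Bool))))
    (Q1 : List (Int × PvSt)) (v : Int) (s : PvSt) :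
    List (List (List (List (Option Int)))) × List (Int × PvSt) :=
  let x := s.1
  let y := s.2.1
  let acc := s.2.2.1
  let o := s.2.2.2
  let dxy := pvDeltaO o
  let nx := x + dxy.1
  let ny := y + dxy.2
  let mv :=
    if decide (0 ≤ nx) && decide (nx < n) && decide (0 ≤ ny) && decide (ny < m)
        && pvCellOk L nx ny then
      if decide (acc < 2) && ((pvRd4 vis1 (nx, ny, acc + 1, o)).getD true == false) then
        if pvLtD (v + pvDeltaAcc acc) (pvRd4 dist (nx, ny, acc + 1, o)) then
          (pvWr4 dist (nx, ny, acc + 1, o) (some (v + pvDeltaAcc acc)),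
           Q1 ++ [(v + pvDeltaAcc acc, (nx, ny, acc + 1, o))])
        else (dist, Q1)
      else
        if pvLtD (v + 30) (pvRd4 dist (nx, ny, 2, o))
            && ((pvRd4 vis1 (nx, ny, 2, o)).getD true == false) then
          (pvWr4 dist (nx, ny, 2, o) (some (v + 30)), Q1 ++ [(v + 30, (nx, ny, 2, o))])
        else (dist, Q1)
    else (dist, Q1)
  let no1 := PySem.Int.mod (o + -1) 4
  let t1 :=
    if pvLtD (v + 45) (pvRd4 mv.1 (x, y, 0, no1))
        && ((pvRd4 vis1 (x, y, 0, no1)).getD true == false) then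
      (pvWr4 mv.1 (x, y, 0, no1) (some (v + 45)), mv.2 ++ [(v + 45, (x, y, 0, no1))])
    else mv
  let no2 := PySem.Int.mod (o + 1) 4
  if pvLtD (v + 45) (pvRd4 t1.1 (x, y, 0, no2))
      && ((pvRd4 vis1 (x, y, 0, no2)).getD true == false) then
    (pvWr4 t1.1 (x, y, 0, no2) (some (v + 45)), t1.2 ++ [(v + 45, (x, y, 0, no2))])
  else t1

theorem robotLoopA_step (L : List (List String)) (n m : Int) (fuel : Nat)
    (dist : List (List (List (List (Option Int))))) (vis : List (List (List (List Bool))))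
    (Q : List (Int × PvSt)) (v : Int) (s : PvSt)
    (hq : pvQMin Q = some (v, s)) (hv : pvRd4 vis s = some false) :
    robotLoopA L n m (fuel + 1) dist vis Q =
      robotLoopA L n m fuel
        (pvStepA L n m dist (pvWr4 vis s true) (Q.erase (v, s)) v s).1
        (pvWr4 vis s true)
        (pvStepA L n m dist (pvWr4 vis s true) (Q.erase (v, s)) v s).2 := by
  simp only [robotLoopA, hq, hv]
  rfl

-- the body of B's loop after popping (val, s) unseen
def pvStepB (L : List (List String)) (n m : Int) (seen1 : List (List Bool))
    (dist : List (List (Option Int))) (rest : List (Int × PvSt)) (v : Int) (s : PvSt) :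
    List (List (Option Int)) × List (Int × PvSt) :=
  (bCand L n m seen1 v s).foldl (bRelax seen1) (dist, rest)

theorem robotLoopB_step (L : List (List String)) (n m : Int) (fuel : Nat)
    (dist : List (List (Option Int))) (seen : List (List Bool)) (rest : List (Int × PvSt))
    (v : Int) (s : PvSt)
    (hs : bGet2 seen s.1 (bJ s.2.1 s.2.2.1 s.2.2.2) false = false) :
    robotLoopB L n m (fuel + 1) dist seen ((v, s) :: rest) =
      robotLoopB L n m fuel
        (pvStepB L n m (bSet2 seen s.1 (bJ s.2.1 s.2.2.1 s.2.2.2) true) dist rest v s).1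
        (bSet2 seen s.1 (bJ s.2.1 s.2.2.1 s.2.2.2) true)
        (pvStepB L n m (bSet2 seen s.1 (bJ s.2.1 s.2.2.1 s.2.2.2) true) dist rest v s).2 := by
  simp only [robotLoopB, hs, Bool.false_eq_true, if_false]
  rfl

-- one turn relaxation of A, as a fold step over the turn edges
def pvTurnRelax (vis1 : List (List (List (List Bool))))
    (p : List (List (List (List (Option Int)))) × List (Int × PvSt)) (e : Int × PvSt) :
    List (List (List (List (Option Int)))) × List (Int × PvSt) :=
  if pvLtD e.1 (pvRd4 p.1 e.2) && ((pvRd4 vis1 e.2).getD true == false) then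
    (pvWr4 p.1 e.2 (some e.1), p.2 ++ [e])
  else p

-- A's forward-move relaxation (the `mv` of pvStepA)
def pvMoveA (L : List (List String)) (n m : Int)
    (dist : List (List (List (List (Option Int))))) (vis1 : List (List (List (List Bool))))
    (Q1 : List (Int × PvSt)) (v : Int) (s : PvSt) :
    List (List (List (List (Option Int)))) × List (Int × PvSt) :=
  let nx := s.1 + (pvDeltaO s.2.2.2).1
  let ny := s.2.1 + (pvDeltaO s.2.2.2).2
  if decide (0 ≤ nx) && decide (nx < n) && decide (0 ≤ ny) && decide (ny < m)
      && pvCellOk L nx ny then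
    if decide (s.2.2.1 < 2) &&
        ((pvRd4 vis1 (nx, ny, s.2.2.1 + 1, s.2.2.2)).getD true == false) then
      if pvLtD (v + pvDeltaAcc s.2.2.1) (pvRd4 dist (nx, ny, s.2.2.1 + 1, s.2.2.2)) then
        (pvWr4 dist (nx, ny, s.2.2.1 + 1, s.2.2.2) (some (v + pvDeltaAcc s.2.2.1)),
         Q1 ++ [(v + pvDeltaAcc s.2.2.1, (nx, ny, s.2.2.1 + 1, s.2.2.2))])
      else (dist, Q1)
    else
      if pvLtD (v + 30) (pvRd4 dist (nx, ny, 2, s.2.2.2))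
          && ((pvRd4 vis1 (nx, ny, 2, s.2.2.2)).getD true == false) then
        (pvWr4 dist (nx, ny, 2, s.2.2.2) (some (v + 30)), Q1 ++ [(v + 30, (nx, ny, 2, s.2.2.2))])
      else (dist, Q1)
  else (dist, Q1)

-- B's move-candidate sub-list of bCand
def pvCandMv (L : List (List String)) (n m : Int) (seen1 : List (List Bool)) (val : Int)
    (s : PvSt) : List (Int × PvSt) :=
  let nx := s.1 + (pvDeltaO s.2.2.2).1
  let ny := s.2.1 + (pvDeltaO s.2.2.2).2
  if decide (0 ≤ nx) && decide (nx < n) && decide (0 ≤ ny) && decide (ny < m)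
      && pvCellOk L nx ny then
    if decide (s.2.2.1 < 2) && !(bGet2 seen1 nx (bJ ny (s.2.2.1 + 1) s.2.2.2) false) then
      [(val + pvDeltaAcc s.2.2.1, (nx, ny, s.2.2.1 + 1, s.2.2.2))]
    else [(val + 30, (nx, ny, 2, s.2.2.2))]
  else []

theorem pv_bCand_split (L : List (List String)) (n m : Int) (seen1 : List (List Bool))
    (val : Int) (s : PvSt) :
    bCand L n m seen1 val s =
      pvCandMv L n m seen1 val s ++
        [(val + 45, (s.1, s.2.1, 0, PySem.Int.mod (s.2.2.2 - 1) 4)),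
         (val + 45, (s.1, s.2.1, 0, PySem.Int.mod (s.2.2.2 + 1) 4))] := rfl

theorem pvStepA_eq (L : List (List String)) (n m : Int)
    (dist : List (List (List (List (Option Int))))) (vis1 : List (List (List (List Bool))))
    (Q1 : List (Int × PvSt)) (v : Int) (s : PvSt) :
    pvStepA L n m dist vis1 Q1 v s =
      [((v + 45 : Int), ((s.1 : Int), (s.2.1 : Int), (0 : Int), PySem.Int.mod (s.2.2.2 + -1) 4)),
       (v + 45, (s.1, s.2.1, 0, PySem.Int.mod (s.2.2.2 + 1) 4))].foldl
        (pvTurnRelax vis1) (pvMoveA L n m dist vis1 Q1 v s) := rfl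

-- the forward-move relaxations of the two versions correspond
theorem pv_move_corr {N M : Nat} (L : List (List String))
    {vis1 : List (List (List (List Bool)))} {seen1 : List (List Bool)}
    (rectV1 : pvRect vis1 N M) (rectS1 : pvRect2 seen1 N M)
    (rs1 : ∀ r, pvValidR N M r → pvGet4 vis1 r = pvGet2N seen1 r)
    {dA : List (List (List (List (Option Int))))} {Q1 : List (Int × PvSt)}
    {fl : List (List (Option Int))} {rest : List (Int × PvSt)}
    (mid0 : PvMid N M dA Q1 fl rest) {v : Int} {s : PvSt} (hws : pvWrapSt N M s) :
    PvMid N M (pvMoveA L (N : Int) (M : Int) dA vis1 Q1 v s).1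
      (pvMoveA L (N : Int) (M : Int) dA vis1 Q1 v s).2
      ((pvCandMv L (N : Int) (M : Int) seen1 v s).foldl (bRelax seen1) (fl, rest)).1
      ((pvCandMv L (N : Int) (M : Int) seen1 v s).foldl (bRelax seen1) (fl, rest)).2 := by
  obtain ⟨hx1, hx2, hy1, hy2, ha1, ha2, ho1, ho2⟩ := hws
  simp only [pvMoveA, pvCandMv]
  by_cases hG1 : (decide (0 ≤ s.1 + (pvDeltaO s.2.2.2).1) &&
      decide (s.1 + (pvDeltaO s.2.2.2).1 < (N : Int)) &&
      decide (0 ≤ s.2.1 + (pvDeltaO s.2.2.2).2) &&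
      decide (s.2.1 + (pvDeltaO s.2.2.2).2 < (M : Int)) &&
      pvCellOk L (s.1 + (pvDeltaO s.2.2.2).1) (s.2.1 + (pvDeltaO s.2.2.2).2)) = true
  · rw [if_pos hG1, if_pos hG1]
    have hGp := hG1
    simp only [Bool.and_eq_true, decide_eq_true_eq] at hGp
    obtain ⟨⟨⟨⟨h0nx, hnxN⟩, h0ny⟩, hnyM⟩, _⟩ := hGp
    have hw2 : pvWrapSt N M (s.1 + (pvDeltaO s.2.2.2).1, s.2.1 + (pvDeltaO s.2.2.2).2,
        (2 : Int), s.2.2.2) := by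
      simp only [pvWrapSt]
      exact ⟨by omega, hnxN, by omega, hnyM, by norm_num, by norm_num, ho1, ho2⟩
    by_cases hacc : (decide (s.2.2.1 < 2)) = true
    · have hacclt : s.2.2.1 < 2 := by simpa using hacc
      have hw1 : pvWrapSt N M (s.1 + (pvDeltaO s.2.2.2).1, s.2.1 + (pvDeltaO s.2.2.2).2,
          s.2.2.1 + 1, s.2.2.2) := by
        simp only [pvWrapSt]
        exact ⟨by omega, hnxN, by omega, hnyM, by omega, by omega, ho1, ho2⟩
      obtain ⟨f1, rf1, _, _, hvisf1, hseenf1⟩ := pv_read_corr rectV1 rectS1 rs1 hw1 false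
      have hb1 : bGet2 seen1 (s.1 + (pvDeltaO s.2.2.2).1)
          (bJ (s.2.1 + (pvDeltaO s.2.2.2).2) (s.2.2.1 + 1) s.2.2.2) false = f1 := hseenf1
      have hg1 : ((pvRd4 vis1 (s.1 + (pvDeltaO s.2.2.2).1, s.2.1 + (pvDeltaO s.2.2.2).2,
          s.2.2.1 + 1, s.2.2.2)).getD true == false) = !f1 := by
        rw [hvisf1]; cases f1 <;> rfl
      rw [hg1, hb1]
      cases f1 with
      | false =>
        have hcT : (decide (s.2.2.1 < 2) && !false) = true := by simp; omega
        rw [if_pos hcT, if_pos hcT]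
        obtain ⟨w1, rw1, hres1, hval1, hrdw1, hflw1⟩ :=
          pv_read_corr mid0.rectA mid0.rect2 mid0.rd hw1 none
        rw [List.foldl_cons, List.foldl_nil,
          pv_bRelax_eq (g := pvLtD (v + pvDeltaAcc s.2.2.1)
            (pvRd4 dA (s.1 + (pvDeltaO s.2.2.2).1, s.2.1 + (pvDeltaO s.2.2.2).2,
              s.2.2.1 + 1, s.2.2.2)))
            (by rw [hb1]
                have hi1 : bGet2 fl (s.1 + (pvDeltaO s.2.2.2).1)
                    (bJ (s.2.1 + (pvDeltaO s.2.2.2).2) (s.2.2.1 + 1) s.2.2.2) none = w1 :=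
                  hflw1
                rw [hi1, hrdw1, pv_ltD_some]
                simp),
          pv_ite_pair, pv_ite_pair]
        exact pv_relax_corr (e := (v + pvDeltaAcc s.2.2.1, (s.1 + (pvDeltaO s.2.2.2).1,
          s.2.1 + (pvDeltaO s.2.2.2).2, s.2.2.1 + 1, s.2.2.2))) mid0 hw1 _
      | true =>
        have hcF : ¬ ((decide (s.2.2.1 < 2) && !true) = true) := by simp
        rw [if_neg hcF, if_neg hcF]
        obtain ⟨f2, rf2, _, _, hvisf2, hseenf2⟩ := pv_read_corr rectV1 rectS1 rs1 hw2 false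
        obtain ⟨w2, rw2, hres2, hval2, hrdw2, hflw2⟩ :=
          pv_read_corr mid0.rectA mid0.rect2 mid0.rd hw2 none
        rw [List.foldl_cons, List.foldl_nil,
          pv_bRelax_eq (g := pvLtD (v + 30)
              (pvRd4 dA (s.1 + (pvDeltaO s.2.2.2).1, s.2.1 + (pvDeltaO s.2.2.2).2,
                2, s.2.2.2)) &&
            ((pvRd4 vis1 (s.1 + (pvDeltaO s.2.2.2).1, s.2.1 + (pvDeltaO s.2.2.2).2,
              2, s.2.2.2)).getD true == false))
            (by have hb2 : bGet2 seen1 (s.1 + (pvDeltaO s.2.2.2).1)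
                  (bJ (s.2.1 + (pvDeltaO s.2.2.2).2) 2 s.2.2.2) false = f2 := hseenf2
                have hi2 : bGet2 fl (s.1 + (pvDeltaO s.2.2.2).1)
                  (bJ (s.2.1 + (pvDeltaO s.2.2.2).2) 2 s.2.2.2) none = w2 := hflw2
                rw [hb2, hi2, hrdw2, hvisf2, pv_ltD_some]
                cases f2 <;> simp),
          pv_ite_pair, pv_ite_pair]
        exact pv_relax_corr (e := ((v + 30 : Int), (s.1 + (pvDeltaO s.2.2.2).1,
          s.2.1 + (pvDeltaO s.2.2.2).2, (2 : Int), s.2.2.2))) mid0 hw2 _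
    · have haccf : (decide (s.2.2.1 < 2)) = false := by simpa using hacc
      have hA2 : ¬ ((decide (s.2.2.1 < 2) &&
          ((pvRd4 vis1 (s.1 + (pvDeltaO s.2.2.2).1, s.2.1 + (pvDeltaO s.2.2.2).2,
            s.2.2.1 + 1, s.2.2.2)).getD true == false)) = true) := by
        have h2 : ¬ (s.2.2.1 < 2) := by simpa using haccf
        simp
        intro h
        exact absurd (by omega) h2
      have hB2 : ¬ ((decide (s.2.2.1 < 2) && !(bGet2 seen1 (s.1 + (pvDeltaO s.2.2.2).1)
          (bJ (s.2.1 + (pvDeltaO s.2.2.2).2) (s.2.2.1 + 1) s.2.2.2) false)) = true) := by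
        have h2 : ¬ (s.2.2.1 < 2) := by simpa using haccf
        simp
        intro h
        exact absurd (by omega) h2
      rw [if_neg hA2, if_neg hB2]
      obtain ⟨f2, rf2, _, _, hvisf2, hseenf2⟩ := pv_read_corr rectV1 rectS1 rs1 hw2 false
      obtain ⟨w2, rw2, hres2, hval2, hrdw2, hflw2⟩ :=
        pv_read_corr mid0.rectA mid0.rect2 mid0.rd hw2 none
      rw [List.foldl_cons, List.foldl_nil,
        pv_bRelax_eq (g := pvLtD (v + 30)
            (pvRd4 dA (s.1 + (pvDeltaO s.2.2.2).1, s.2.1 + (pvDeltaO s.2.2.2).2,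
              2, s.2.2.2)) &&
          ((pvRd4 vis1 (s.1 + (pvDeltaO s.2.2.2).1, s.2.1 + (pvDeltaO s.2.2.2).2,
            2, s.2.2.2)).getD true == false))
          (by have hb2 : bGet2 seen1 (s.1 + (pvDeltaO s.2.2.2).1)
                (bJ (s.2.1 + (pvDeltaO s.2.2.2).2) 2 s.2.2.2) false = f2 := hseenf2
              have hi2 : bGet2 fl (s.1 + (pvDeltaO s.2.2.2).1)
                (bJ (s.2.1 + (pvDeltaO s.2.2.2).2) 2 s.2.2.2) none = w2 := hflw2
              rw [hb2, hi2, hrdw2, hvisf2, pv_ltD_some]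
              cases f2 <;> simp),
        pv_ite_pair, pv_ite_pair]
      exact pv_relax_corr (e := ((v + 30 : Int), (s.1 + (pvDeltaO s.2.2.2).1,
        s.2.1 + (pvDeltaO s.2.2.2).2, (2 : Int), s.2.2.2))) mid0 hw2 _
  · rw [if_neg hG1, if_neg hG1]
    simpa using mid0

-- a common list of edges relaxed in lock step
theorem pv_fold_corr {N M : Nat} {vis1 : List (List (List (List Bool)))}
    {seen1 : List (List Bool)} (rectV1 : pvRect vis1 N M) (rectS1 : pvRect2 seen1 N M)
    (rs1 : ∀ r, pvValidR N M r → pvGet4 vis1 r = pvGet2N seen1 r) :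
    ∀ (E : List (Int × PvSt)) {dA : List (List (List (List (Option Int))))}
      {Q1 : List (Int × PvSt)} {fl : List (List (Option Int))} {rest : List (Int × PvSt)},
      PvMid N M dA Q1 fl rest → (∀ e ∈ E, pvWrapSt N M e.2) →
      PvMid N M (E.foldl (pvTurnRelax vis1) (dA, Q1)).1
        (E.foldl (pvTurnRelax vis1) (dA, Q1)).2
        (E.foldl (bRelax seen1) (fl, rest)).1
        (E.foldl (bRelax seen1) (fl, rest)).2 := by
  intro E
  induction E with
  | nil => intro dA Q1 fl rest mid _; exact mid
  | cons e E ih =>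
    intro dA Q1 fl rest mid hwrap
    have hwe : pvWrapSt N M e.2 := hwrap e List.mem_cons_self
    obtain ⟨w, rw_, hres, hval, hrdw, hflw⟩ :=
      pv_read_corr mid.rectA mid.rect2 mid.rd hwe none
    obtain ⟨f, rf, _, _, hvisf, hseenf⟩ := pv_read_corr rectV1 rectS1 rs1 hwe false
    rw [List.foldl_cons, List.foldl_cons,
      pv_bRelax_eq (g := pvLtD e.1 (pvRd4 dA e.2) &&
        ((pvRd4 vis1 e.2).getD true == false))
        (by have hb : bGet2 seen1 e.2.1 (bJ e.2.2.1 e.2.2.2.1 e.2.2.2.2) false = f := hseenf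
            have hi : bGet2 fl e.2.1 (bJ e.2.2.1 e.2.2.2.1 e.2.2.2.2) none = w := hflw
            rw [hb, hi, hrdw, hvisf, pv_ltD_some]
            cases f <;> simp),
      show pvTurnRelax vis1 (dA, Q1) e =
        if (pvLtD e.1 (pvRd4 dA e.2) && ((pvRd4 vis1 e.2).getD true == false)) = true then
          (pvWr4 dA e.2 (some e.1), Q1 ++ [e])
        else (dA, Q1) from rfl,
      pv_ite_pair, pv_ite_pair]
    exact ih (pv_relax_corr mid hwe _) (fun e' he' => hwrap e' (List.mem_cons_of_mem _ he'))

-- one fresh settle step: the relaxed tables and queues correspond again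
theorem pv_step_mid {N M : Nat} (L : List (List String))
    {vis1 : List (List (List (List Bool)))} {seen1 : List (List Bool)}
    (rectV1 : pvRect vis1 N M) (rectS1 : pvRect2 seen1 N M)
    (rs1 : ∀ r, pvValidR N M r → pvGet4 vis1 r = pvGet2N seen1 r)
    {dA : List (List (List (List (Option Int))))} {Q1 : List (Int × PvSt)}
    {fl : List (List (Option Int))} {rest : List (Int × PvSt)}
    (mid0 : PvMid N M dA Q1 fl rest) {v : Int} {s : PvSt} (hws : pvWrapSt N M s) :
    PvMid N M (pvStepA L (N : Int) (M : Int) dA vis1 Q1 v s).1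
      (pvStepA L (N : Int) (M : Int) dA vis1 Q1 v s).2
      (pvStepB L (N : Int) (M : Int) seen1 fl rest v s).1
      (pvStepB L (N : Int) (M : Int) seen1 fl rest v s).2 := by
  have hsub : s.2.2.2 - 1 = s.2.2.2 + -1 := by ring
  have hmod4 : (0 : Int) < 4 := by norm_num
  have hwu1 : pvWrapSt N M ((s.1 : Int), (s.2.1 : Int), (0 : Int),
      PySem.Int.mod (s.2.2.2 + -1) 4) := by
    simp only [pvWrapSt]
    exact ⟨hws.1, hws.2.1, hws.2.2.1, hws.2.2.2.1, le_refl 0, by norm_num,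
      PySem.Int.mod_nonneg _ hmod4, PySem.Int.mod_lt _ hmod4⟩
  have hwu2 : pvWrapSt N M ((s.1 : Int), (s.2.1 : Int), (0 : Int),
      PySem.Int.mod (s.2.2.2 + 1) 4) := by
    simp only [pvWrapSt]
    exact ⟨hws.1, hws.2.1, hws.2.2.1, hws.2.2.2.1, le_refl 0, by norm_num,
      PySem.Int.mod_nonneg _ hmod4, PySem.Int.mod_lt _ hmod4⟩
  have hBun : pvStepB L (N : Int) (M : Int) seen1 fl rest v s =
      ([((v + 45 : Int), ((s.1 : Int), (s.2.1 : Int), (0 : Int),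
          PySem.Int.mod (s.2.2.2 + -1) 4)),
        (v + 45, (s.1, s.2.1, 0, PySem.Int.mod (s.2.2.2 + 1) 4))]).foldl
        (bRelax seen1)
        ((pvCandMv L (N : Int) (M : Int) seen1 v s).foldl (bRelax seen1) (fl, rest)) := by
    rw [pvStepB, pv_bCand_split, List.foldl_append, hsub]
  rw [pvStepA_eq, hBun]
  obtain ⟨d2, q2, hdq⟩ : ∃ d2 q2, pvMoveA L (N : Int) (M : Int) dA vis1 Q1 v s = (d2, q2) :=
    ⟨_, _, rfl⟩
  obtain ⟨f2, r2, hfr⟩ : ∃ f2 r2, (pvCandMv L (N : Int) (M : Int) seen1 v s).foldl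
      (bRelax seen1) (fl, rest) = (f2, r2) := ⟨_, _, rfl⟩
  have midmv := pv_move_corr (v := v) L rectV1 rectS1 rs1 mid0 hws
  rw [hdq, hfr] at midmv ⊢
  refine pv_fold_corr rectV1 rectS1 rs1 _ midmv ?_
  intro e he
  rcases List.mem_cons.mp he with rfl | he2
  · exact hwu1
  · rw [List.mem_singleton.mp he2]
    exact hwu2

-- ---------- the lock-step invariant of the two loops ----------

def PvOut (N M : Nat) (dA : List (List (List (List (Option Int)))))
    (fl : List (List (Option Int))) : Prop :=
  pvRect dA N M ∧ pvRect2 fl N M ∧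
    ∀ r, pvValidR N M r → pvGet4 dA r = pvGet2N fl r

structure PvInv (N M : Nat) (dA : List (List (List (List (Option Int)))))
    (vis : List (List (List (List Bool)))) (Qa : List (Int × PvSt))
    (fl : List (List (Option Int))) (seen : List (List Bool))
    (Qb : List (Int × PvSt)) : Prop where
  mid : PvMid N M dA Qa fl Qb
  rectV : pvRect vis N M
  rectS : pvRect2 seen N M
  rs : ∀ r, pvValidR N M r → pvGet4 vis r = pvGet2N seen r

theorem pv_loop_corr (L : List (List String)) (N M : Nat) :
    ∀ (fuel : Nat) dA vis (Qa : List (Int × PvSt)) (fl : List (List (Option Int)))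
      (seen : List (List Bool)) (Qb : List (Int × PvSt)),
      PvInv N M dA vis Qa fl seen Qb →
      PvOut N M (robotLoopA L (N : Int) (M : Int) fuel dA vis Qa)
        (robotLoopB L (N : Int) (M : Int) fuel fl seen Qb) := by
  intro fuel
  induction fuel with
  | zero =>
    intro dA vis Qa fl seen Qb inv
    exact ⟨inv.mid.rectA, inv.mid.rect2, inv.mid.rd⟩
  | succ fuel ih =>
    intro dA vis Qa fl seen Qb inv
    cases Qb with
    | nil =>
      simp only [robotLoopA, robotLoopB, pv_qmin_nil_of_perm inv.mid.perm]
      exact ⟨inv.mid.rectA, inv.mid.rect2, inv.mid.rd⟩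
    | cons p rest =>
      obtain ⟨v, s⟩ := p
      have hqmin : pvQMin Qa = some (v, s) := pv_qmin_head inv.mid.perm inv.mid.sorted
      have hsmem : (v, s) ∈ Qa := inv.mid.perm.mem_iff.mpr List.mem_cons_self
      have hws : pvWrapSt N M s := inv.mid.wrap (v, s) hsmem
      obtain ⟨flag, rS, hresS, hvalS, hvisS, hseenS⟩ :=
        pv_read_corr inv.rectV inv.rectS inv.rs hws false
      have herase : (Qa.erase (v, s)).Perm rest := by
        have := inv.mid.perm.erase (v, s)
        rwa [List.erase_cons_head] at this
      have hwrapE : ∀ q ∈ Qa.erase (v, s), pvWrapSt N M q.2 := fun q hq =>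
        inv.mid.wrap q (List.mem_of_mem_erase hq)
      have hsortedE : rest.Pairwise (fun a b => pvEntryLt b a = false) :=
        (List.pairwise_cons.mp inv.mid.sorted).2
      have mid0 : PvMid N M dA (Qa.erase (v, s)) fl rest :=
        ⟨inv.mid.rectA, inv.mid.rect2, inv.mid.rd, hwrapE, herase, hsortedE⟩
      cases flag with
      | true =>
        simp only [robotLoopA, robotLoopB, hqmin, hvisS, hseenS, if_true]
        exact ih dA vis (Qa.erase (v, s)) fl seen rest ⟨mid0, inv.rectV, inv.rectS, inv.rs⟩
      | false =>
        rw [robotLoopA_step L (N : Int) (M : Int) fuel dA vis Qa v s hqmin hvisS,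
          robotLoopB_step L (N : Int) (M : Int) fuel fl seen rest v s hseenS]
        obtain ⟨rS', hresS', hvalS', hxS, hjS⟩ := pv_wrap_res hws
        have hrr : rS' = rS := by
          rw [hresS] at hresS'
          exact (Option.some_inj.mp hresS').symm
        subst hrr
        have rectV1 := pv_rect_wr4 inv.rectV s true
        have rectS1 := pv_rect2_set inv.rectS s.1 (bJ s.2.1 s.2.2.1 s.2.2.2) (true : Bool)
        have rs1 : ∀ r, pvValidR N M r → pvGet4 (pvWr4 vis s true) r =
            pvGet2N (bSet2 seen s.1 (bJ s.2.1 s.2.2.1 s.2.2.2) true) r :=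
          pv_corr_write inv.rectV inv.rectS inv.rs hresS' hvalS' hxS hjS true
        exact ih _ _ _ _ _ _ ⟨pv_step_mid L rectV1 rectS1 rs1 mid0 hws, rectV1, rectS1, rs1⟩

-- ---------- answer extraction: A's 12-slot minimum equals B's row minimum ----------

-- seen[x][j]-style reads through the row fetched with a default
theorem pv_bGet2_row {α : Type} (fl : List (List α)) (x j : Int) (d : α) :
    bGet2 fl x j d = (PySem.List.pyGet? ((PySem.List.pyGet? fl x).getD []) j).getD d := by
  cases h : PySem.List.pyGet? fl x with
  | none =>
    have h0 : PySem.List.pyGet? ([] : List α) j = none := by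
      rw [pv_pyGet?_eq]
      have hz : PySem.List.pyIdx? ([] : List α).length j = none := by
        simp only [List.length_nil, PySem.List.pyIdx?]
        split <;> split <;> simp_all <;> omega
      simp [hz]
    simp [bGet2, h, h0]
  | some row => simp [bGet2, h]

theorem pv_ans_corr {N M : Nat} {dA : List (List (List (List (Option Int))))}
    {fl : List (List (Option Int))} (out : PvOut N M dA fl) {Bp : Int × Int}
    (hB2 : -(N : Int) ≤ Bp.2 ∧ Bp.2 < (N : Int)) (hB1 : -(M : Int) ≤ Bp.1 ∧ Bp.1 < (M : Int)) :
    pvAnsA dA Bp =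
      (PySem.List.pyRange 0 12 1).foldl
        (fun best t => pvMinO best
          ((PySem.List.pyGet? ((PySem.List.pyGet? fl Bp.2).getD []) (Bp.1 * 12 + t)).getD
            none)) none := by
  obtain ⟨rect, rect2, rd⟩ := out
  have key : ∀ (ci cj : Int), 0 ≤ ci → ci < 3 → 0 ≤ cj → cj < 4 →
      (pvRd4 dA (Bp.2, Bp.1, ci, cj)).getD none =
        (PySem.List.pyGet? ((PySem.List.pyGet? fl Bp.2).getD [])
          (Bp.1 * 12 + (ci * 4 + cj))).getD none := by
    intro ci cj h1 h2 h3 h4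
    have hw : pvWrapSt N M (Bp.2, Bp.1, ci, cj) := by
      simp only [pvWrapSt]
      exact ⟨hB2.1, hB2.2, hB1.1, hB1.2, h1, h2, h3, h4⟩
    obtain ⟨w, r, hres, hval, hrdw, hflw⟩ := pv_read_corr rect rect2 rd hw none
    rw [hrdw]
    rw [pv_bGet2_row] at hflw
    rw [show Bp.1 * 12 + (ci * 4 + cj) = bJ Bp.1 ci cj from by simp [bJ]; ring, hflw]
    rfl
  have hr3 : PySem.List.pyRange 0 3 1 = [0, 1, 2] := by decide
  have hr4 : PySem.List.pyRange 0 4 1 = [0, 1, 2, 3] := by decide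
  have hr12 : PySem.List.pyRange 0 12 1 = [0, 1, 2, 3, 4, 5, 6, 7, 8, 9, 10, 11] := by decide
  simp only [pvAnsA, hr3, hr4, hr12, List.foldl_cons, List.foldl_nil]
  rw [key 0 0 (by norm_num) (by norm_num) (by norm_num) (by norm_num),
    key 0 1 (by norm_num) (by norm_num) (by norm_num) (by norm_num),
    key 0 2 (by norm_num) (by norm_num) (by norm_num) (by norm_num),
    key 0 3 (by norm_num) (by norm_num) (by norm_num) (by norm_num),
    key 1 0 (by norm_num) (by norm_num) (by norm_num) (by norm_num),
    key 1 1 (by norm_num) (by norm_num) (by norm_num) (by norm_num),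
    key 1 2 (by norm_num) (by norm_num) (by norm_num) (by norm_num),
    key 1 3 (by norm_num) (by norm_num) (by norm_num) (by norm_num),
    key 2 0 (by norm_num) (by norm_num) (by norm_num) (by norm_num),
    key 2 1 (by norm_num) (by norm_num) (by norm_num) (by norm_num),
    key 2 2 (by norm_num) (by norm_num) (by norm_num) (by norm_num),
    key 2 3 (by norm_num) (by norm_num) (by norm_num) (by norm_num)]
  norm_num

-- ---------- the initial tables correspond ----------

theorem pv_init_rd {α : Type} (N M : Nat) (v : α) :
    ∀ r, pvValidR N M r → pvGet4 (pvMk4 (N : Int) (M : Int) v) r =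
      pvGet2N (List.replicate N (List.replicate (M * 12) v)) r := by
  intro r hr
  have hf := pv_ifl_lt hr
  obtain ⟨r1, r2, r3, r4⟩ := r
  obtain ⟨h1, h2, h3, h4⟩ := hr
  simp only [pvMk4, pvGet4, pvGet2N, Int.toNat_natCast, List.getElem?_replicate]
  interval_cases r3 <;> interval_cases r4 <;> simp [h1, h2, hf]

-- ===== VERDICT =====
theorem robot_spec : Claim_equal_robot := by
  intro L A B _ hpre
  obtain ⟨hL, _hrows, hA2, hA1, hB2, hB1⟩ := hpre
  show robot L A B = robot_alt L A B
  have hm : (PySem.List.pyGet? L 0).getD [] = L.headD [] := by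
    cases L with
    | nil => simp at hL
    | cons a l => simp [PySem.List.pyGet?_zero]
  have hlen : PySem.List.len L = (L.length : Int) := rfl
  have hlen2 : PySem.List.len (L.headD []) = ((L.headD []).length : Int) := rfl
  have hcast : (((L.headD []).length : Int) * 12).toNat = (L.headD []).length * 12 := by
    rw [show (((L.headD []).length : Int) * 12) =
      (((L.headD []).length * 12 : Nat) : Int) by push_cast; ring, Int.toNat_natCast]
  simp only [robot, robot_alt, hm, hlen, hlen2, hcast, Int.toNat_natCast]
  have inv0 : PvInv L.length (L.headD []).length
      (pvMk4 (L.length : Int) ((L.headD []).length : Int) none)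
      (pvMk4 (L.length : Int) ((L.headD []).length : Int) false)
      [(0, (A.2, A.1, 0, 0))]
      (List.replicate L.length (List.replicate ((L.headD []).length * 12) none))
      (List.replicate L.length (List.replicate ((L.headD []).length * 12) false))
      [(0, (A.2, A.1, 0, 0))] := by
    refine ⟨⟨?_, ?_, pv_init_rd _ _ none, ?_, List.Perm.refl _, ?_⟩, ?_, ?_,
      pv_init_rd _ _ false⟩
    · simpa using pv_rect_mk4 (L.length : Int) ((L.headD []).length : Int) none
    · refine ⟨by simp, ?_⟩
      intro row hrow
      rw [List.eq_of_mem_replicate hrow]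
      simp
    · intro p hp
      rw [List.mem_singleton.mp hp]
      simp only [pvWrapSt]
      exact ⟨hA2.1, hA2.2, hA1.1, hA1.2, le_refl 0, by norm_num, le_refl 0, by norm_num⟩
    · exact List.pairwise_singleton _ _
    · simpa using pv_rect_mk4 (L.length : Int) ((L.headD []).length : Int) false
    · refine ⟨by simp, ?_⟩
      intro row hrow
      rw [List.eq_of_mem_replicate hrow]
      simp
  have out := pv_loop_corr L L.length (L.headD []).length
    (100 * (L.length * (L.headD []).length) + 10) _ _ _ _ _ _ inv0
  exact pv_ans_corr out hB2 hB1
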